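-- pv_equiv track=rewrite | github.com/ifeanyicyriacus/javaClass | phase-gate-chibuzor/studentgrade.py | subjectToPassList
-- ===== SOURCE A (Python) =====
-- def getNumbersThatPassed(column:list, passMark:int) -> int:
--     passCount = 0
--     for value in column:
--         if value >= passMark:
--             passCount += 1
--     return passCount
--
-- def flipTable(table:list, row:int, col:int) -> list:
--     flippedTable = []
--     hasGeneratedRequiredCol = False
--     for rowIndex in range(row):
--         for colIndex in range(col):
--             if hasGeneratedRequiredCol == False:
--                 flippedTable.insert(colIndex, [table[rowIndex][colIndex]])
--             else:
--                 flippedTable[colIndex].append(table[rowIndex][colIndex])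
--         hasGeneratedRequiredCol = True
--     return flippedTable
--
-- def subjectToPassList(scoreSheet:list, numberOfSubject:int) -> list:
--     numberOfStudent = len(scoreSheet)
--     flippedTable = flipTable(scoreSheet, numberOfStudent, numberOfSubject)
--     passes = []
--     index = 0
--     for subjectScores in flippedTable:
--         passes.insert(index, getNumbersThatPassed(subjectScores, 50))
--         index += 1
--     return passes
-- ===== SOURCE B (Python) =====
-- def subjectToPassList(scoreSheet: list, numberOfSubject: int) -> list:
--     if not scoreSheet:
--         return []
--     passes = []
--     for subject in range(numberOfSubject):
--         count = 0
--         for row in scoreSheet: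
--             if row[subject] >= 50:
--                 count += 1
--         passes.append(count)
--     return passes
-- ===== Notes on version B (the rewrite author's own statement) =====
-- stated objective: simpler
-- what changed: B drops the transpose step entirely: instead of building a flipped table with insert/append bookkeeping and then counting each column list, it scans each subject column of the original sheet directly with one running counter per subject.
import Mathlib
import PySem

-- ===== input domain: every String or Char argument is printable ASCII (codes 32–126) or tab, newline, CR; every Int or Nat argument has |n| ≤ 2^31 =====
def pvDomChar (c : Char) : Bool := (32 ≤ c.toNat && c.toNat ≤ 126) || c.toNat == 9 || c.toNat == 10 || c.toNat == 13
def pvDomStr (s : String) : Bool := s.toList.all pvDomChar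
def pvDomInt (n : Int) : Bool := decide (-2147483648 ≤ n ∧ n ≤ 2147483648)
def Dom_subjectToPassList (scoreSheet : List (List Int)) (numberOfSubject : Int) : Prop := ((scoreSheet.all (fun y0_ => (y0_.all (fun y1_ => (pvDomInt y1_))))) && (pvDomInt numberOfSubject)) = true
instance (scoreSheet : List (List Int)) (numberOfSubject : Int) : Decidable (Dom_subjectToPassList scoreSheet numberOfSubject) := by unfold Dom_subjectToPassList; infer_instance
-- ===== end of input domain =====

-- B counts passes per subject by scanning each column of scoreSheet directly, dropping A's intermediate transposed table (simpler decomposition; same cost).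


-- ===== PORT A =====
def getNumbersThatPassed (column : List Int) (passMark : Int) : Int :=
  column.foldl (fun passCount v => if v ≥ passMark then passCount + 1 else passCount) 0

def flipTable (table : List (List Int)) (row : Int) (col : Int) : List (List Int) :=
  (((PySem.List.pyRange 0 row 1).foldl
    (fun (st : List (List Int) × Bool) rowIndex =>
      ((PySem.List.pyRange 0 col 1).foldl
        (fun (ft : List (List Int)) colIndex =>
          let x := PySem.List.pyGetD (PySem.List.pyGetD table rowIndex []) colIndex 0
          if st.2 == false then
            PySem.List.insert ft colIndex [x]
          else
            ft.modify colIndex.toNat (fun c => c ++ [x]))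
        st.1, true))
    ([], false))).1

def subjectToPassList (scoreSheet : List (List Int)) (numberOfSubject : Int) : List Int :=
  let numberOfStudent : Int := scoreSheet.length
  let flippedTable := flipTable scoreSheet numberOfStudent numberOfSubject
  ((flippedTable.foldl
      (fun (st : List Int × Int) subjectScores =>
        (PySem.List.insert st.1 st.2 (getNumbersThatPassed subjectScores 50), st.2 + 1))
      ([], 0))).1

-- ===== PORT B =====
def subjectToPassList_alt (scoreSheet : List (List Int)) (numberOfSubject : Int) : List Int :=
  if scoreSheet = [] then []
  else
    (PySem.List.pyRange 0 numberOfSubject 1).foldl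
      (fun passes subject =>
        passes ++ [scoreSheet.foldl
          (fun count row => if PySem.List.pyGetD row subject 0 ≥ 50 then count + 1 else count) 0])
      []


-- inner loop, first row: repeated insert-at-own-length builds the column list

-- ===== PRECONDITION & SPEC =====
-- Pre_ excludes exactly the inputs on which Python A raises IndexError (a non-empty sheet with some row shorter than numberOfSubject); B raises there too.
def Pre_subjectToPassList (scoreSheet : List (List Int)) (numberOfSubject : Int) : Prop :=
  ∀ row ∈ scoreSheet, numberOfSubject ≤ (row.length : Int)
instance (scoreSheet : List (List Int)) (numberOfSubject : Int) : Decidable (Pre_subjectToPassList scoreSheet numberOfSubject) := by unfold Pre_subjectToPassList; infer_instance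
def pvWitness_subjectToPassList : List (List Int) × Int := ([[60, 40], [50, 70]], 2)

def Spec_subjectToPassList (scoreSheet : List (List Int)) (numberOfSubject : Int) (out : List Int) : Prop := out = subjectToPassList_alt scoreSheet numberOfSubject
instance (scoreSheet : List (List Int)) (numberOfSubject : Int) (out : List Int) : Decidable (Spec_subjectToPassList scoreSheet numberOfSubject out) := by unfold Spec_subjectToPassList; infer_instance

-- ===== CLAIM (what is proved, stated in full; the proofs are below) =====
def Claim_equal_subjectToPassList : Prop := ∀ (scoreSheet : List (List Int)) (numberOfSubject : Int), Dom_subjectToPassList scoreSheet numberOfSubject → Pre_subjectToPassList scoreSheet numberOfSubject → Spec_subjectToPassList scoreSheet numberOfSubject (subjectToPassList scoreSheet numberOfSubject)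

-- ===== LEMMAS AND PROOFS =====
-- inner loop, first row: repeated insert-at-own-length builds the column list
theorem insertFold {α : Type} (g : Int → α) (b : Int) : ∀ (a : Int) (acc : List α),
    0 ≤ a → (acc.length : Int) = a →
    (PySem.List.pyRange a b 1).foldl (fun ft j => PySem.List.insert ft j (g j)) acc
      = acc ++ (PySem.List.pyRange a b 1).map g := by
  intro a acc ha hlen
  by_cases hab : b ≤ a
  · rw [PySem.List.pyRange_one_eq_nil hab]; simp
  · rw [not_le] at hab
    rw [PySem.List.pyRange_one_cons hab]
    simp only [List.foldl_cons, List.map_cons]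
    have h1 : PySem.List.insert acc a (g a) = acc ++ [g a] := by
      have := PySem.List.insert_len acc (g a)
      simpa [PySem.List.len, hlen] using this
    rw [h1, insertFold g b (a + 1) (acc ++ [g a]) (by omega) (by simp; omega)]
    simp
termination_by a => (b - a).toNat
decreasing_by omega

-- pointwise description of a fold of modifies at distinct nonnegative indices
theorem modFold {α : Type} (f : Int → α → α) : ∀ (R : List Int) (L : List α) (k : Nat),
    (∀ j ∈ R, 0 ≤ j) → R.Nodup →
    ((R.foldl (fun L j => L.modify j.toNat (f j)) L))[k]? =
      if ((k : Int) ∈ R) then (f (k : Int)) <$> L[k]? else L[k]? := by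
  intro R
  induction R with
  | nil => simp
  | cons j R ih =>
    intro L k hpos hnd
    simp only [List.foldl_cons]
    rw [ih _ k (fun x hx => hpos x (List.mem_cons_of_mem _ hx)) hnd.of_cons]
    have hj : 0 ≤ j := hpos j (List.mem_cons_self)
    rw [List.getElem?_modify]
    by_cases hk : (k : Int) ∈ R
    · have hkj : j ≠ (k : Int) := fun h => ((List.nodup_cons.mp hnd).1 (h ▸ hk)).elim
      have : j.toNat ≠ k := by omega
      simp [hk, this, List.mem_cons]
    · by_cases hkj : (k : Int) = j
      · have : j.toNat = k := by omega
        have hjR : j ∉ R := hkj ▸ hk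
        simp [hkj, this, hjR]
      · have : j.toNat ≠ k := by omega
        simp [hk, hkj, this]

-- one later row: the modify loop appends that row's entry to every column
theorem stepRow {α : Type} (col : Int) (g : Int → α) (f : Int → α → α) :
    (PySem.List.pyRange 0 col 1).foldl (fun L j => L.modify j.toNat (f j))
        ((PySem.List.pyRange 0 col 1).map g)
      = (PySem.List.pyRange 0 col 1).map (fun j => f j (g j)) := by
  by_cases hc : 0 ≤ col
  · apply List.ext_getElem?
    intro k
    rw [modFold f _ _ k (fun j hj => (PySem.List.mem_pyRange_one.1 hj).1)
        (PySem.List.nodup_pyRange_one _ _)]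
    by_cases hk : (k : Int) < col
    · have hkn : k < col.toNat := by omega
      have hcol : col = ((col.toNat : Nat) : Int) := by omega
      rw [hcol]
      rw [PySem.List.getElem?_map_pyRange_zero g col.toNat k hkn,
          PySem.List.getElem?_map_pyRange_zero (fun j => f j (g j)) col.toNat k hkn]
      simp [PySem.List.mem_pyRange_one, hk]
    · have h1 : ¬ ((k : Int) ∈ PySem.List.pyRange 0 col 1) := by
        simp [PySem.List.mem_pyRange_one]; omega
      have hlen : k ≥ ((PySem.List.pyRange 0 col 1).map g).length := by
        simp [PySem.List.length_pyRange_one]; omega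
      have hlen2 : k ≥ ((PySem.List.pyRange 0 col 1).map (fun j => f j (g j))).length := by
        simp [PySem.List.length_pyRange_one]; omega
      rw [List.getElem?_eq_none hlen, List.getElem?_eq_none hlen2]
      simp [h1]
  · rw [PySem.List.pyRange_one_eq_nil (by omega)]; simp

-- the remaining rows of the outer loop (flag already true)
theorem rowsFold (col : Int) : ∀ (ts : List (List Int)) (g : Int → List Int),
    ((ts.foldl (fun (st : List (List Int) × Bool) row =>
        ((PySem.List.pyRange 0 col 1).foldl
          (fun ft j =>
            if st.2 == false then
              PySem.List.insert ft j [PySem.List.pyGetD row j 0]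
            else
              ft.modify j.toNat (fun c => c ++ [PySem.List.pyGetD row j 0]))
          st.1, true))
      ((PySem.List.pyRange 0 col 1).map g, true))).1
    = (PySem.List.pyRange 0 col 1).map
        (fun j => g j ++ ts.map (fun r => PySem.List.pyGetD r j 0)) := by
  intro ts
  induction ts with
  | nil => intro g; simp
  | cons r ts ih =>
    intro g
    simp only [List.foldl_cons]
    rw [show ((PySem.List.pyRange 0 col 1).foldl
        (fun ft j =>
          if ((((PySem.List.pyRange 0 col 1).map g, true) : List (List Int) × Bool)).2 == false then
            PySem.List.insert ft j [PySem.List.pyGetD r j 0]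
          else
            ft.modify j.toNat (fun c => c ++ [PySem.List.pyGetD r j 0]))
        (((PySem.List.pyRange 0 col 1).map g, true) : List (List Int) × Bool).1)
      = (PySem.List.pyRange 0 col 1).map (fun j => g j ++ [PySem.List.pyGetD r j 0]) from by
        simpa using stepRow col g (fun j c => c ++ [PySem.List.pyGetD r j 0])]
    rw [ih (fun j => g j ++ [PySem.List.pyGetD r j 0])]
    simp

-- the passes loop: insert at the running index is append
theorem passesFold (g : List Int → Int) : ∀ (l : List (List Int)) (acc : List Int),
    ((l.foldl (fun (st : List Int × Int) s => (PySem.List.insert st.1 st.2 (g s), st.2 + 1))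
      (acc, (acc.length : Int)))).1 = acc ++ l.map g := by
  intro l
  induction l with
  | nil => intro acc; simp
  | cons s l ih =>
    intro acc
    simp only [List.foldl_cons]
    have h1 : PySem.List.insert acc (acc.length : Int) (g s) = acc ++ [g s] := by
      simpa [PySem.List.len] using PySem.List.insert_len acc (g s)
    have h2 : ((acc.length : Int) + 1) = (((acc ++ [g s]).length : Nat) : Int) := by simp
    rw [h1, h2, ih (acc ++ [g s])]
    simp

-- B's outer loop: append-fold is map
theorem appendFold {α : Type} (h : Int → α) (R : List Int) : ∀ (acc : List α),
    R.foldl (fun ps j => ps ++ [h j]) acc = acc ++ R.map h := by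
  induction R with
  | nil => intro acc; simp
  | cons j R ih => intro acc; simp only [List.foldl_cons, List.map_cons]; rw [ih]; simp

theorem mainEq (s : List (List Int)) (n : Int) :
    subjectToPassList s n = subjectToPassList_alt s n := by
  cases s with
  | nil =>
    simp [subjectToPassList, subjectToPassList_alt, flipTable,
      PySem.List.pyRange_one_eq_nil (le_refl (0 : Int))]
  | cons t0 ts =>
    have hflip : flipTable (t0 :: ts) (((t0 :: ts).length : Nat) : Int) n
        = (PySem.List.pyRange 0 n 1).map
            (fun j => (t0 :: ts).map (fun r => PySem.List.pyGetD r j 0)) := by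
      unfold flipTable
      rw [PySem.List.foldl_pyRange_zero_pyGetD' (t0 :: ts) ([] : List Int)
        (fun (st : List (List Int) × Bool) row =>
          ((PySem.List.pyRange 0 n 1).foldl
            (fun ft j =>
              if st.2 == false then
                PySem.List.insert ft j [PySem.List.pyGetD row j 0]
              else
                ft.modify j.toNat (fun c => c ++ [PySem.List.pyGetD row j 0]))
            st.1, true))
        (([], false) : List (List Int) × Bool)]
      simp only [List.foldl_cons]
      rw [show ((PySem.List.pyRange 0 n 1).foldl
          (fun ft j =>
            if ((([], false) : List (List Int) × Bool)).2 == false then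
              PySem.List.insert ft j [PySem.List.pyGetD t0 j 0]
            else
              ft.modify j.toNat (fun c => c ++ [PySem.List.pyGetD t0 j 0]))
          (([], false) : List (List Int) × Bool).1)
        = (PySem.List.pyRange 0 n 1).map (fun j => [PySem.List.pyGetD t0 j 0]) from by
          simpa using insertFold (fun j => [PySem.List.pyGetD t0 j 0]) n 0 [] (le_refl 0) (by simp)]
      rw [rowsFold n ts (fun j => [PySem.List.pyGetD t0 j 0])]
      simp only [List.singleton_append, List.map_cons]
    simp only [subjectToPassList]
    rw [hflip]
    have hp := passesFold (fun c => getNumbersThatPassed c 50)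
      ((PySem.List.pyRange 0 n 1).map (fun j => (t0 :: ts).map (fun r => PySem.List.pyGetD r j 0))) []
    simp only [List.length_nil, Nat.cast_zero, List.nil_append] at hp
    rw [hp]
    simp only [subjectToPassList_alt, if_neg (List.cons_ne_nil t0 ts)]
    rw [appendFold _ _ []]
    simp only [List.nil_append, List.map_map]
    apply List.map_congr_left
    intro j _
    simp only [Function.comp, getNumbersThatPassed, List.foldl_map]

-- ===== VERDICT (by name: the statement is the Claim_ definition above) =====
theorem subjectToPassList_spec : Claim_equal_subjectToPassList := by
  intro scoreSheet numberOfSubject _ _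
  exact mainEq scoreSheet numberOfSubject
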